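-- pv_equiv track=rewrite | github.com/Mikhanick/Labas | laba4/main_with_def.py | stoka
-- ===== SOURCE A (Python) =====
-- def stoka(star,zero, add, width = 90):
--     s=''
--     for i in range(1,width+1):
--         if i == star:
--             s+= '*'
--         elif i == zero:
--             s+='|'
--
--
--         elif i in add:
--             s += '.'
--         else:
--             s+= " "
--     return s
-- ===== SOURCE B (Python) =====
-- def stoka(star, zero, add, width=90):
--     arr = [' '] * max(width, 0)
--     for p in add:
--         if 1 <= p <= width:
--             arr[p - 1] = '.'
--     if 1 <= zero <= width:
--         arr[zero - 1] = '|'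
--     if 1 <= star <= width:
--         arr[star - 1] = '*'
--     return ''.join(arr)
-- ===== Notes on version B (the rewrite author's own statement) =====
-- stated objective: faster
-- what changed: B allocates a width-long space buffer and scatter-writes marks in reverse priority (add dots, then the zero bar, then the star), instead of A's scan over every position with an 'i in add' membership test per cell.
import Mathlib
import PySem

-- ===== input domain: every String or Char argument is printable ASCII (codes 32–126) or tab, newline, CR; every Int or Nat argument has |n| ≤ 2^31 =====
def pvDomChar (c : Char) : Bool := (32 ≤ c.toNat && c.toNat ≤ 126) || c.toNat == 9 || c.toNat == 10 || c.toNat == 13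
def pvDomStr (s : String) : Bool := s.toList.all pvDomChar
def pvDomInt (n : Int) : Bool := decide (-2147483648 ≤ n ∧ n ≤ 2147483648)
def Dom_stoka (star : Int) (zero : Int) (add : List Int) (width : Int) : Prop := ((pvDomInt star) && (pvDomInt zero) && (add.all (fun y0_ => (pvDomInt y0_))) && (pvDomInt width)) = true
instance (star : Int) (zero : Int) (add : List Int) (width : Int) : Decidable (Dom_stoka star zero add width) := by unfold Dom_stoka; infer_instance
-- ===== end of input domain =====

-- B builds a width-long space buffer and scatter-writes the marks in reverse priority
-- (dots, then '|', then '*') instead of A's per-position scan with a membership test.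

-- ===== PORT A =====
def stoka (star : Int) (zero : Int) (add : List Int) (width : Int) : String :=
  String.mk ((PySem.List.pyRange 1 (width + 1) 1).foldl
    (fun s i =>
      if i = star then s ++ ['*']
      else if i = zero then s ++ ['|']
      else if add.contains i then s ++ ['.']
      else s ++ [' ']) [])

-- ===== PORT B =====
def stoka_alt (star : Int) (zero : Int) (add : List Int) (width : Int) : String :=
  let arr0 := List.replicate (max width 0).toNat ' '
  let arr1 := add.foldl (fun a p => if 1 ≤ p ∧ p ≤ width then a.set (p - 1).toNat '.' else a) arr0
  let arr2 := if 1 ≤ zero ∧ zero ≤ width then arr1.set (zero - 1).toNat '|' else arr1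
  let arr3 := if 1 ≤ star ∧ star ≤ width then arr2.set (star - 1).toNat '*' else arr2
  String.mk arr3

-- ===== PRECONDITION & SPEC =====
def Spec_stoka (star : Int) (zero : Int) (add : List Int) (width : Int) (out : String) : Prop := out = stoka_alt star zero add width
instance (star : Int) (zero : Int) (add : List Int) (width : Int) (out : String) : Decidable (Spec_stoka star zero add width out) := by unfold Spec_stoka; infer_instance

-- ===== CLAIM (what is proved, stated in full; the proofs are below) =====
def Claim_equal_stoka : Prop := ∀ (star : Int) (zero : Int) (add : List Int) (width : Int), Dom_stoka star zero add width → Spec_stoka star zero add width (stoka star zero add width)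

-- ===== LEMMAS AND PROOFS =====

-- A's per-cell mark as a function of the position.
def pvMark (star zero : Int) (add : List Int) (i : Int) : Char :=
  if i = star then '*' else if i = zero then '|' else if add.contains i then '.' else ' '

-- B's intermediate buffers, named for the proofs (definitionally the lets of stoka_alt).
def pvL1 (width : Int) (add : List Int) (n : Nat) : List Char :=
  add.foldl (fun a p => if 1 ≤ p ∧ p ≤ width then a.set (p - 1).toNat '.' else a)
    (List.replicate n ' ')

def pvL2 (zero : Int) (add : List Int) (width : Int) (n : Nat) : List Char :=
  if 1 ≤ zero ∧ zero ≤ width then (pvL1 width add n).set (zero - 1).toNat '|' else pvL1 width add n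

def pvL3 (star zero : Int) (add : List Int) (width : Int) (n : Nat) : List Char :=
  if 1 ≤ star ∧ star ≤ width then (pvL2 zero add width n).set (star - 1).toNat '*'
  else pvL2 zero add width n

lemma stoka_alt_eq (star zero : Int) (add : List Int) (width : Int) :
    stoka_alt star zero add width
      = String.mk (pvL3 star zero add width (max width 0).toNat) := rfl

lemma foldl_append_map (f : Int → Char) :
    ∀ (l : List Int) (acc : List Char),
      l.foldl (fun s i => s ++ [f i]) acc = acc ++ l.map f := by
  intro l
  induction l with
  | nil => intro acc; simp
  | cons x xs ih => intro acc; simp [List.foldl_cons, ih]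

lemma stoka_eq_map (star zero : Int) (add : List Int) (width : Int) :
    stoka star zero add width
      = String.mk ((PySem.List.pyRange 1 (width + 1) 1).map (pvMark star zero add)) := by
  unfold stoka
  rw [show (fun (s : List Char) (i : Int) =>
      if i = star then s ++ ['*']
      else if i = zero then s ++ ['|']
      else if add.contains i then s ++ ['.']
      else s ++ [' ']) = fun s i => s ++ [pvMark star zero add i] by
    funext s i; unfold pvMark; split_ifs <;> rfl]
  rw [foldl_append_map]
  rfl

lemma pvL1_length (width : Int) :
    ∀ (add : List Int) (a : List Char),
      (add.foldl (fun a p => if 1 ≤ p ∧ p ≤ width then a.set (p - 1).toNat '.' else a) a).length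
        = a.length := by
  intro add
  induction add with
  | nil => intro a; rfl
  | cons p ps ih =>
      intro a
      simp only [List.foldl_cons]
      rw [ih]
      split_ifs <;> simp

lemma pvL1_len (width : Int) (add : List Int) (n : Nat) : (pvL1 width add n).length = n := by
  unfold pvL1; rw [pvL1_length width]; simp

lemma pvL2_len (zero : Int) (add : List Int) (width : Int) (n : Nat) :
    (pvL2 zero add width n).length = n := by
  unfold pvL2; split_ifs <;> simp [pvL1_len]

lemma pvL3_len (star zero : Int) (add : List Int) (width : Int) (n : Nat) :
    (pvL3 star zero add width n).length = n := by
  unfold pvL3; split_ifs <;> simp [pvL2_len]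

lemma addLoop_getElem (width : Int) (j : Nat) :
    ∀ (add : List Int) (a : List Char) (h : j < a.length)
      (h2 : j <
        (add.foldl (fun a p => if 1 ≤ p ∧ p ≤ width then a.set (p - 1).toNat '.' else a) a).length),
      (add.foldl (fun a p => if 1 ≤ p ∧ p ≤ width then a.set (p - 1).toNat '.' else a) a)[j]
        = if add.contains ((j : Int) + 1) ∧ (j : Int) + 1 ≤ width then '.' else a[j] := by
  intro add
  induction add with
  | nil => intro a h h2; simp
  | cons p ps ih =>
      intro a h h2
      simp only [List.foldl_cons] at h2 ⊢
      have hlen : j < (if 1 ≤ p ∧ p ≤ width then a.set (p - 1).toNat '.' else a).length := by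
        split_ifs <;> simpa using h
      rw [ih _ hlen h2]
      by_cases hp : 1 ≤ p ∧ p ≤ width
      · have ha : (if 1 ≤ p ∧ p ≤ width then a.set (p - 1).toNat '.' else a)
            = a.set (p - 1).toNat '.' := if_pos hp
        simp only [ha, List.getElem_set]
        by_cases hpe : p = (j : Int) + 1
        · have hidx : (p - 1).toNat = j := by omega
          have hcons : (p :: ps).contains ((j : Int) + 1) = true := by
            simp [← hpe]
          have hjw : (j : Int) + 1 ≤ width := by omega
          simp only [if_pos hidx, if_pos (And.intro hcons hjw)]
          split_ifs <;> rfl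
        · have hidx : ¬ ((p - 1).toNat = j) := by omega
          have hbe : ((j : Int) + 1 == p) = false := by
            simp only [beq_eq_false_iff_ne, ne_eq]; omega
          have hcc : (p :: ps).contains ((j : Int) + 1) = ps.contains ((j : Int) + 1) := by
            simp only [List.contains_cons, hbe, Bool.false_or]
          simp only [if_neg hidx, hcc]
      · have ha : (if 1 ≤ p ∧ p ≤ width then a.set (p - 1).toNat '.' else a) = a := if_neg hp
        simp only [ha]
        by_cases hpe : p = (j : Int) + 1
        · have hnw : ¬ ((j : Int) + 1 ≤ width) := by omega
          have h1 : ¬ (ps.contains ((j : Int) + 1) = true ∧ (j : Int) + 1 ≤ width) :=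
            fun hh => hnw hh.2
          have h2 : ¬ ((p :: ps).contains ((j : Int) + 1) = true ∧ (j : Int) + 1 ≤ width) :=
            fun hh => hnw hh.2
          simp only [if_neg h1, if_neg h2]
        · have hbe : ((j : Int) + 1 == p) = false := by
            simp only [beq_eq_false_iff_ne, ne_eq]; omega
          have hcc : (p :: ps).contains ((j : Int) + 1) = ps.contains ((j : Int) + 1) := by
            simp only [List.contains_cons, hbe, Bool.false_or]
          simp only [hcc]

lemma pvL1_get (width : Int) (add : List Int) (n j : Nat) (hj : j < n)
    (hjw : (j : Int) + 1 ≤ width) (hlen : j < (pvL1 width add n).length) :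
    (pvL1 width add n)[j] = if add.contains ((j : Int) + 1) then '.' else ' ' := by
  have h2 : j < ((add.foldl
      (fun a p => if 1 ≤ p ∧ p ≤ width then a.set (p - 1).toNat '.' else a)
      (List.replicate n ' '))).length := by simpa [pvL1] using hlen
  have heq := addLoop_getElem width j add (List.replicate n ' ') (by simpa using hj) h2
  have hcast : (pvL1 width add n)[j]'hlen
      = (add.foldl (fun a p => if 1 ≤ p ∧ p ≤ width then a.set (p - 1).toNat '.' else a)
        (List.replicate n ' '))[j]'h2 := rfl
  rw [hcast, heq]
  by_cases hc : ((j : Int) + 1) ∈ add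
  · have hlt : ((j : Int)) < width := by omega
    simp [hc, hlt]
  · simp [hc]

lemma pvL3_get (star zero : Int) (add : List Int) (width : Int) (n j : Nat)
    (hnw : (n : Int) ≤ width) (hj : j < n) (hlen : j < (pvL3 star zero add width n).length) :
    (pvL3 star zero add width n)[j] = pvMark star zero add ((j : Int) + 1) := by
  have hjw : (j : Int) + 1 ≤ width := by omega
  have hL2 : j < (pvL2 zero add width n).length := by rw [pvL2_len]; exact hj
  have hL1 : j < (pvL1 width add n).length := by rw [pvL1_len]; exact hj
  unfold pvMark
  by_cases hs : (j : Int) + 1 = star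
  · have hg : 1 ≤ star ∧ star ≤ width := by omega
    have ha : pvL3 star zero add width n = (pvL2 zero add width n).set (star - 1).toNat '*' := by
      unfold pvL3; exact if_pos hg
    simp only [ha, List.getElem_set, if_pos (by omega : (star - 1).toNat = j)]
    rw [if_pos hs]
  · have hstep : (pvL3 star zero add width n)[j]'hlen = (pvL2 zero add width n)[j]'hL2 := by
      by_cases c : 1 ≤ star ∧ star ≤ width
      · have ha : pvL3 star zero add width n
            = (pvL2 zero add width n).set (star - 1).toNat '*' := by
          unfold pvL3; exact if_pos c
        simp only [ha, List.getElem_set]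
        rw [if_neg (by omega : ¬ (star - 1).toNat = j)]
      · have ha : pvL3 star zero add width n = pvL2 zero add width n := by
          unfold pvL3; exact if_neg c
        simp only [ha]
    rw [hstep, if_neg hs]
    by_cases hz : (j : Int) + 1 = zero
    · have hg : 1 ≤ zero ∧ zero ≤ width := by omega
      have ha : pvL2 zero add width n = (pvL1 width add n).set (zero - 1).toNat '|' := by
        unfold pvL2; exact if_pos hg
      simp only [ha, List.getElem_set, if_pos (by omega : (zero - 1).toNat = j)]
      rw [if_pos hz]
    · have hstep2 : (pvL2 zero add width n)[j]'hL2 = (pvL1 width add n)[j]'hL1 := by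
        by_cases c : 1 ≤ zero ∧ zero ≤ width
        · have ha : pvL2 zero add width n
              = (pvL1 width add n).set (zero - 1).toNat '|' := by
            unfold pvL2; exact if_pos c
          simp only [ha, List.getElem_set]
          rw [if_neg (by omega : ¬ (zero - 1).toNat = j)]
        · have ha : pvL2 zero add width n = pvL1 width add n := by
            unfold pvL2; exact if_neg c
          simp only [ha]
      rw [hstep2, if_neg hz, pvL1_get width add n j hj hjw hL1]

-- ===== VERDICT (by name: the statement is the Claim_ definition above) =====
theorem stoka_spec : Claim_equal_stoka := by
  intro star zero add width _
  unfold Spec_stoka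
  rw [stoka_eq_map, stoka_alt_eq]
  congr 1
  rw [PySem.List.pyRange_one]
  have hw : ((width + 1 : Int) - 1).toNat = (max width 0).toNat := by omega
  rw [hw]
  set n := (max width 0).toNat with hn
  apply List.ext_getElem
  · simp [pvL3_len]
  · intro j h1 h2
    have hj : j < n := by rw [pvL3_len] at h2; exact h2
    simp only [List.getElem_map, List.getElem_range]
    rw [pvL3_get star zero add width n j (by omega) hj h2]
    congr 1
    all_goals omega
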